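-- pv_equiv track=rewrite | github.com/981377660LMT/algorithm-study | 19_数学/数论/康托展开/string_permutation.py | find_string_no_permutation_no
-- ===== SOURCE A (Python) =====
-- def find_string_no_permutation_no(s):
--     n = len(s)
--
--     fact = [1] * (n + 1)
--     for i in range(1, n + 1):
--         fact[i] = fact[i - 1] * i  # !mod
--
--     freq = dict()
--     for c in s:
--         if c not in freq:
--             freq[c] = 0
--         freq[c] += 1
--     chars = list(sorted(list(set(s))))
--
--     res = 0
--     for i in range(n):
--         for c in chars:
--             if freq[c] == 0:
--                 continue
--
--             if c >= s[i]:
--                 break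
--
--             freq[c] -= 1
--
--             num = fact[n - i - 1]
--             for v in freq.values():
--                 if v != 0:
--                     num //= fact[v]  # !mod inv
--
--             res += num
--             freq[c] += 1
--
--         freq[s[i]] -= 1
--
--     return res
-- ===== SOURCE B (Python) =====
-- def find_string_no_permutation_no(s):
--     n = len(s)
--
--     fact = [1] * (n + 1)
--     for i in range(1, n + 1):
--         fact[i] = fact[i - 1] * i
--
--     freq = {}
--     for c in s:
--         freq[c] = freq.get(c, 0) + 1
--
--     # denominator of the multinomial of the remaining suffix, kept up to date
--     denom = 1
--     for v in freq.values():
--         denom *= fact[v]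
--
--     res = 0
--     rem = n
--     for ch in s:
--         rem -= 1
--         for c, v in freq.items():
--             if v > 0 and c < ch:
--                 res += fact[rem] * v // denom
--         denom //= freq[ch]
--         freq[ch] -= 1
--     return res
-- ===== Notes on version B (the rewrite author's own statement) =====
-- stated objective: faster
-- what changed: B maintains the multinomial denominator as one running product that is updated with a single exact division per position, and counts each smaller candidate character with one multiply-divide, eliminating A's inner pass over all character frequencies (with a big-integer division each) per candidate; O(n*alpha) divisions instead of O(n*alpha^2).
import Mathlib
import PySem

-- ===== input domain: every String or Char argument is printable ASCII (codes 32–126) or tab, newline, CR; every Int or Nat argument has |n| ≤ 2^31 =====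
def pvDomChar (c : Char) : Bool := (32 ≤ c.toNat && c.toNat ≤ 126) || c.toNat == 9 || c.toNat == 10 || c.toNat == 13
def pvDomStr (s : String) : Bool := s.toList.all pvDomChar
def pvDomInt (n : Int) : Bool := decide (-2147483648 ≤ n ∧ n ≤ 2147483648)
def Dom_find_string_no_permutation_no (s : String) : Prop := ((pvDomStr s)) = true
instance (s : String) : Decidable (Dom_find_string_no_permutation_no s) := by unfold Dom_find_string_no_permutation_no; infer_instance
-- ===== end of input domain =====

-- B replaces A's per-candidate inner pass over all frequencies (repeated big-int divisions)
-- by a running multinomial-denominator product updated in O(1) per position, one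
-- multiply-divide per candidate character (objective: faster; measured).

-- ===== PORT A =====

-- fact = [1]*(n+1); for i in range(1, n+1): fact[i] = fact[i-1]*i
-- (i ≥ 1 on this loop, so `i.toNat` is exact here)
def pvBuildFact (n : Nat) : List Int :=
  (PySem.List.pyRange 1 ((n : Int) + 1)).foldl
    (fun f i => f.set i.toNat (PySem.List.pyGetD f (i - 1) 0 * i))
    (List.replicate (n + 1) 1)

-- freq = dict(); for c in s: if c not in freq: freq[c] = 0; freq[c] += 1
def pvFreqA (cs : List Char) : PySem.Dict Char Int :=
  cs.foldl (fun d c =>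
    let d' := if d.contains c then d else d.insert c 0
    d'.insert c (d'.getD c 0 + 1)) PySem.Dict.empty

-- the inner `for c in chars` loop with `continue`/`break`; `freq[c]` exists for every
-- c ∈ chars, so the lookup is `getD _ 0` (KeyError is unreachable)
def pvInnerA (fact : List Int) (rem : Int) (si : Char) :
    List Char → PySem.Dict Char Int → Int → Int
  | [], _, res => res
  | c :: rest, freq, res =>
    let v := freq.getD c 0
    if v = 0 then pvInnerA fact rem si rest freq res          -- continue
    else if si ≤ c then res                                    -- break (c >= s[i])
    else
      -- freq[c] -= 1; num = fact[n-i-1]; for v in freq.values(): if v != 0: num //= fact[v]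
      let freq' := freq.insert c (v - 1)
      let num := freq'.values.foldl
        (fun num w => if w ≠ 0 then PySem.Int.floordiv num (PySem.List.pyGetD fact w 0) else num)
        (PySem.List.pyGetD fact rem 0)
      -- res += num; freq[c] += 1 (restores freq, so we continue with the original dict)
      pvInnerA fact rem si rest freq (res + num)

-- body of `for i in range(n)`; `s[i]` is always in range on this loop
def pvStepA (cs : List Char) (fact : List Int) (chars : List Char)
    (st : PySem.Dict Char Int × Int) (i : Int) : PySem.Dict Char Int × Int :=
  let si := PySem.List.pyGetD cs i ' '
  let res := pvInnerA fact (PySem.List.len cs - i - 1) si chars st.1 st.2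
  (st.1.modify si 0 (fun v => v - 1), res)   -- freq[s[i]] -= 1 (key always present)

def find_string_no_permutation_no (s : String) : Int :=
  let cs := s.toList
  let n := cs.length
  let fact := pvBuildFact n
  let freq := pvFreqA cs
  let chars := PySem.List.sorted (PySem.Set.ofList cs) id   -- chars = sorted(set(s))
  let st := (PySem.List.pyRange 0 (PySem.List.len cs)).foldl (pvStepA cs fact chars) (freq, 0)
  st.2

-- ===== PORT B =====

-- loop body of `for ch in s`: rem -= 1; one multiply-divide per candidate char;
-- denom //= freq[ch]; freq[ch] -= 1  (state: (freq, denom, res, rem))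
def pvStepB (fact : List Int) (st : PySem.Dict Char Int × Int × Int × Int) (ch : Char) :
    PySem.Dict Char Int × Int × Int × Int :=
  let freq := st.1
  let denom := st.2.1
  let rem := st.2.2.2 - 1
  let res := freq.items.foldl
    (fun r p => if 0 < p.2 ∧ p.1 < ch
                then r + PySem.Int.floordiv (PySem.List.pyGetD fact rem 0 * p.2) denom
                else r)
    st.2.2.1
  (freq.insert ch (freq.getD ch 0 - 1),
   PySem.Int.floordiv denom (freq.getD ch 0),    -- freq[ch] ≥ 1 here, no ZeroDivision
   res, rem)

def find_string_no_permutation_no_alt (s : String) : Int :=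
  let cs := s.toList
  let n := cs.length
  let fact := pvBuildFact n                                  -- same factorial-table loop as A
  let freq := cs.foldl (fun d c => d.insert c (d.getD c 0 + 1)) PySem.Dict.empty
  let denom := freq.values.foldl (fun a v => a * PySem.List.pyGetD fact v 0) 1
  let st := cs.foldl (pvStepB fact) (freq, denom, 0, (n : Int))
  st.2.2.1

-- ===== PRECONDITION & SPEC =====
def Spec_find_string_no_permutation_no (s : String) (out : Int) : Prop := out = find_string_no_permutation_no_alt s
instance (s : String) (out : Int) : Decidable (Spec_find_string_no_permutation_no s out) := by unfold Spec_find_string_no_permutation_no; infer_instance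

-- ===== CLAIM (what is proved, stated in full; the proofs are below) =====
def Claim_equal_find_string_no_permutation_no : Prop := ∀ (s : String), Dom_find_string_no_permutation_no s → Spec_find_string_no_permutation_no s (find_string_no_permutation_no s)

-- ===== LEMMAS AND PROOFS =====

lemma pvFact_loop (n k : Nat) (hk : k ≤ n) :
    (PySem.List.pyRange 1 ((k : Int) + 1)).foldl
      (fun f i => f.set i.toNat (PySem.List.pyGetD f (i - 1) 0 * i))
      (List.replicate (n + 1) 1)
    = (List.range (k + 1)).map (fun i => (Nat.factorial i : Int)) ++ List.replicate (n - k) 1 := by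
  induction k with
  | zero =>
      have h0 : PySem.List.pyRange 1 ((0 : Int) + 1) = [] := by decide
      simp [List.replicate_succ, Nat.factorial]
  | succ k ih =>
      have hk' : k ≤ n := Nat.le_of_succ_le hk
      have hcast : ((k + 1 : Nat) : Int) + 1 = ((k : Int) + 1) + 1 := by push_cast; ring
      rw [hcast, PySem.List.pyRange_one_succ_right (by omega), List.foldl_append,
        ih hk']
      have hM : ((List.range (k + 1)).map (fun i => (Nat.factorial i : Int))).length = k + 1 := by
        simp
      have hget : PySem.List.pyGetD
          ((List.range (k + 1)).map (fun i => (Nat.factorial i : Int)) ++ List.replicate (n - k) 1)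
          (((k : Int) + 1) - 1) 0 = (Nat.factorial k : Int) := by
        have : ((k : Int) + 1) - 1 = ((k : Nat) : Int) := by ring
        rw [this, PySem.List.pyGetD_natCast, List.getD_append _ _ _ _ (by simp)]
        rw [List.getD_eq_getElem _ _ (by simp)]
        simp
      simp only [List.foldl_cons, List.foldl_nil, hget]
      have htn : (((k : Int) + 1)).toNat = k + 1 := by omega
      rw [htn]
      have hrep : List.replicate (n - k) (1 : Int) = 1 :: List.replicate (n - (k + 1)) 1 := by
        have : n - k = (n - (k + 1)) + 1 := by omega
        rw [this, List.replicate_succ]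
      rw [hrep, List.set_append_right _ _ (by simp [hM])]
      simp only [hM]
      have : k + 1 - (k + 1) = 0 := by omega
      rw [this]
      simp only [List.set_cons_zero]
      rw [List.range_succ, List.map_append]
      simp only [List.map_cons, List.map_nil, List.append_assoc]
      have hfs : (Nat.factorial k : Int) * ((k : Int) + 1) = (Nat.factorial (k + 1) : Int) := by
        rw [Nat.factorial_succ]; push_cast; ring
      rw [hfs]
      simp [List.range_succ]

lemma pvFact_eq (n : Nat) :
    pvBuildFact n = (List.range (n + 1)).map (fun i => (Nat.factorial i : Int)) := by
  have := pvFact_loop n n le_rfl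
  simpa [pvBuildFact] using this

lemma pvFact_getD (n : Nat) (v : Int) (h0 : 0 ≤ v) (h : v.toNat ≤ n) :
    PySem.List.pyGetD (pvBuildFact n) v 0 = (Nat.factorial v.toNat : Int) := by
  have hv : v = ((v.toNat : Nat) : Int) := by omega
  rw [pvFact_eq, hv, PySem.List.pyGetD_natCast]
  rw [List.getD_eq_getElem _ _ (by simp; omega)]
  simp [Int.toNat_of_nonneg h0]

lemma pvFoldDiv (n : Nat) (ws : List Int) (A : Nat)
    (h : ∀ w ∈ ws, 0 ≤ w ∧ w.toNat ≤ n) :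
    ws.foldl (fun num w => if w ≠ 0 then PySem.Int.floordiv num (PySem.List.pyGetD (pvBuildFact n) w 0) else num) (A : Int)
    = ((A / (ws.map (fun w => Nat.factorial w.toNat)).prod : Nat) : Int) := by
  induction ws generalizing A with
  | nil => simp
  | cons w ws ih =>
    obtain ⟨h0, hn⟩ := h w (by simp)
    have hrest : ∀ x ∈ ws, 0 ≤ x ∧ x.toNat ≤ n := fun x hx => h x (by simp [hx])
    simp only [List.foldl_cons, List.map_cons, List.prod_cons]
    by_cases hw : w = 0
    · subst hw
      rw [if_neg (by simp)]
      rw [ih A hrest]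
      norm_num [Nat.factorial]
    · rw [if_pos hw, pvFact_getD n w h0 hn, PySem.Int.floordiv_natCast, ih _ hrest,
        Nat.div_div_eq_div_mul]

lemma pvFoldMul (n : Nat) (ws : List Int) (a : Nat)
    (h : ∀ w ∈ ws, 0 ≤ w ∧ w.toNat ≤ n) :
    ws.foldl (fun a v => a * PySem.List.pyGetD (pvBuildFact n) v 0) (a : Int)
    = ((a * (ws.map (fun w => Nat.factorial w.toNat)).prod : Nat) : Int) := by
  induction ws generalizing a with
  | nil => simp
  | cons w ws ih =>
    obtain ⟨h0, hn⟩ := h w (by simp)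
    simp only [List.foldl_cons, List.map_cons, List.prod_cons]
    rw [pvFact_getD n w h0 hn]
    have : (a : Int) * (Nat.factorial w.toNat : Int) = ((a * Nat.factorial w.toNat : Nat) : Int) := by
      push_cast; ring
    rw [this, ih _ (fun x hx => h x (by simp [hx]))]
    congr 1
    ring

lemma pvFoldIf {α : Type} (p : α → Prop) [DecidablePred p] (t : α → Int) (l : List α) (r : Int) :
    l.foldl (fun r x => if p x then r + t x else r) r
    = r + (l.map (fun x => if p x then t x else 0)).sum := by
  induction l generalizing r with
  | nil => simp
  | cons x l ih => by_cases h : p x <;> simp [h, ih, add_assoc]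

lemma pvProdDec (keys : List Char) (hnd : keys.Nodup) (F : Char → Nat) (c : Char)
    (hc : c ∈ keys) (hv : 1 ≤ F c) :
    ((keys.map (fun x => Nat.factorial (F x - (if x = c then 1 else 0)))).prod) * F c
    = (keys.map (fun x => Nat.factorial (F x))).prod := by
  induction keys with
  | nil => cases hc
  | cons k keys ih =>
    simp only [List.map_cons, List.prod_cons]
    rcases List.mem_cons.mp hc with rfl | hc'
    · have hnotin : c ∉ keys := (List.nodup_cons.mp hnd).1
      have hmap : keys.map (fun x => Nat.factorial (F x - if x = c then 1 else 0))
          = keys.map (fun x => Nat.factorial (F x)) := by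
        apply List.map_congr_left; intro x hx
        have : x ≠ c := fun e => hnotin (e ▸ hx)
        simp [this]
      rw [if_pos rfl, hmap]
      have hm := Nat.mul_factorial_pred (n := F c) (by omega)
      calc Nat.factorial (F c - 1) * (keys.map (fun x => Nat.factorial (F x))).prod * F c
          = (F c * Nat.factorial (F c - 1)) * (keys.map (fun x => Nat.factorial (F x))).prod := by ring
        _ = _ := by rw [hm]
    · have hne : k ≠ c := fun e => (List.nodup_cons.mp hnd).1 (e ▸ hc')
      rw [if_neg hne, mul_assoc, ih (List.nodup_cons.mp hnd).2 hc']
      simp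


lemma pvInnerA_sum (fact : List Int) (rem : Int) (si : Char) (chars : List Char)
    (hp : chars.Pairwise (· < ·)) (freq : PySem.Dict Char Int) (res : Int) :
    pvInnerA fact rem si chars freq res
    = res + (chars.map (fun c => if freq.getD c 0 ≠ 0 ∧ c < si
        then ((freq.insert c (freq.getD c 0 - 1)).values.foldl
          (fun num w => if w ≠ 0 then PySem.Int.floordiv num (PySem.List.pyGetD fact w 0) else num)
          (PySem.List.pyGetD fact rem 0))
        else 0)).sum := by
  induction chars generalizing res with
  | nil => simp [pvInnerA]
  | cons c cs ih =>
    have hp' := List.pairwise_cons.mp hp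
    rw [pvInnerA]
    by_cases h0 : freq.getD c 0 = 0
    · rw [if_pos h0, ih hp'.2]
      simp [h0]
    · rw [if_neg h0]
      by_cases hb : si ≤ c
      · rw [if_pos hb]
        have hzero : ∀ x ∈ cs.map (fun c => if freq.getD c 0 ≠ 0 ∧ c < si
            then ((freq.insert c (freq.getD c 0 - 1)).values.foldl
              (fun num w => if w ≠ 0 then PySem.Int.floordiv num (PySem.List.pyGetD fact w 0) else num)
              (PySem.List.pyGetD fact rem 0)) else 0), x = 0 := by
          intro x hx
          obtain ⟨c', hc', rfl⟩ := List.mem_map.mp hx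
          have : ¬ c' < si := not_lt_of_ge (le_trans hb (le_of_lt (hp'.1 c' hc')))
          simp [this]
        rw [List.map_cons, List.sum_cons, List.sum_eq_zero hzero]
        have : ¬ c < si := not_lt_of_ge hb
        simp [this]
      · rw [if_neg hb, ih hp'.2]
        have hlt : c < si := lt_of_not_ge hb
        simp [h0, hlt, add_assoc]

lemma pvChars_pairwise (cs : List Char) :
    (PySem.List.sorted (PySem.Set.ofList cs) id).Pairwise (· < ·) := by
  have h1 := PySem.List.sorted_pairwise (PySem.Set.ofList cs) id
  have h2 : (PySem.List.sorted (PySem.Set.ofList cs) id).Nodup :=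
    ((PySem.List.sorted_perm (PySem.Set.ofList cs) id false).symm).nodup
      (PySem.Set.nodup_ofList cs)
  exact (h1.and h2).imp (fun h => lt_of_le_of_ne h.1 h.2)

lemma pvCount_le (cs done rest : List Char) (h : cs = done ++ rest) (x : Char) :
    rest.count x ≤ cs.length := by
  subst h
  calc rest.count x ≤ rest.length := List.count_le_length
    _ ≤ (done ++ rest).length := by simp
  -- (maybe omega)

lemma pvMain (cs : List Char) (rest : List Char) :
    ∀ (done : List Char) (freqA freqB : PySem.Dict Char Int) (denom resA : Int),
    cs = done ++ rest →
    freqA.keys = PySem.Set.ofList cs →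
    freqB.keys = PySem.Set.ofList cs →
    (∀ c, freqA.getD c 0 = (rest.count c : Int)) →
    (∀ c, freqB.getD c 0 = (rest.count c : Int)) →
    denom = ((((PySem.Set.ofList cs : List Char)).map (fun c => Nat.factorial (rest.count c))).prod : Int) →
    (((PySem.List.pyRange (done.length : Int) (cs.length : Int)).foldl
        (pvStepA cs (pvBuildFact cs.length) (PySem.List.sorted (PySem.Set.ofList cs) id))
        (freqA, resA)).2)
    = ((rest.foldl (pvStepB (pvBuildFact cs.length)) (freqB, denom, resA, (rest.length : Int))).2.2.1) := by
  induction rest with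
  | nil =>
      intro done freqA freqB denom resA hcs _ _ _ _ _
      have : (done.length : Int) = (cs.length : Int) := by subst hcs; simp
      rw [this]
      simp [PySem.List.pyRange]
  | cons ch rest' ih =>
      intro done freqA freqB denom resA hcs hkA hkB hgA hgB hden
      have hlen : cs.length = done.length + (rest'.length + 1) := by subst hcs; simp
      have hlt : (done.length : Int) < (cs.length : Int) := by
        have := hlen; omega
      rw [PySem.List.pyRange_one_cons hlt, List.foldl_cons, List.foldl_cons]
      have hch : PySem.List.pyGetD cs (done.length : Int) ' ' = ch := by
        rw [PySem.List.pyGetD_natCast]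
        subst hcs
        rw [List.getD_eq_getElem _ _ (by simp)]
        rw [List.getElem_append_right (le_refl _)]
        simp
      have hrem : PySem.List.len cs - (done.length : Int) - 1 = (rest'.length : Int) := by
        simp only [PySem.List.len]
        omega
      have hrem' : ((rest'.length + 1 : Nat) : Int) - 1 = (rest'.length : Int) := by push_cast; ring
      -- the common summand
      set K : List Char := (PySem.Set.ofList cs : List Char) with hK
      have hndK : K.Nodup := PySem.Set.nodup_ofList cs
      have hmemK : ∀ c, c ∈ K ↔ c ∈ cs := fun c => PySem.Set.mem_ofList cs c
      have hcntle : ∀ x, (ch :: rest').count x ≤ cs.length := fun x => pvCount_le cs done _ hcs x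
      have hchK : ch ∈ K := (hmemK ch).mpr (by subst hcs; simp)
      have hperm : (PySem.List.sorted (PySem.Set.ofList cs) id).Perm K :=
        PySem.List.sorted_perm _ id false
      set g : Char → Int := fun c => if (ch :: rest').count c ≠ 0 ∧ c < ch
        then ((Nat.factorial rest'.length /
          (K.map (fun x => Nat.factorial ((ch :: rest').count x - if x = c then 1 else 0))).prod : Nat) : Int)
        else 0 with hg
      -- A's inner loop produces resA + (chars.map g).sum
      have hA : pvInnerA (pvBuildFact cs.length) (PySem.List.len cs - (done.length : Int) - 1) ch
          (PySem.List.sorted (PySem.Set.ofList cs) id) freqA resA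
          = resA + ((PySem.List.sorted (PySem.Set.ofList cs) id).map g).sum := by
        rw [pvInnerA_sum _ _ _ _ (pvChars_pairwise cs)]
        congr 1
        apply congrArg List.sum
        apply List.map_congr_left
        intro c hcchars
        have hcK : c ∈ K := hperm.subset hcchars
        simp only [hg, hgA c]
        by_cases h0 : List.count c (ch :: rest') = 0
        · simp [h0]
        · by_cases hlt2 : c < ch
          · have h0' : ((List.count c (ch :: rest') : Nat) : Int) ≠ 0 := by exact_mod_cast h0
            rw [if_pos ⟨h0', hlt2⟩, if_pos ⟨h0, hlt2⟩]
            have hcont : freqA.contains c = true := by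
              rw [PySem.Dict.contains_iff_mem_keys, hkA]; exact hcK
            have hk' : (freqA.insert c (((List.count c (ch :: rest') : Nat) : Int) - 1)).keys = K := by
              rw [PySem.Dict.keys_insert_of_contains _ _ hcont, hkA]
            have hnd' : (freqA.insert c (((List.count c (ch :: rest') : Nat) : Int) - 1)).keys.Nodup := by
              rw [hk']; exact hndK
            rw [PySem.Dict.values_eq_map_keys _ hnd' 0, hk']
            have hvals : K.map (fun k => (freqA.insert c (((List.count c (ch :: rest') : Nat) : Int) - 1)).getD k 0)
                = K.map (fun k => (((ch :: rest').count k - if k = c then 1 else 0 : Nat) : Int)) := by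
              apply List.map_congr_left
              intro x _
              rw [PySem.Dict.getD_insert]
              by_cases hx : x = c
              · rw [if_pos hx, if_pos hx]
                have h1 : 1 ≤ List.count c (ch :: rest') := Nat.one_le_iff_ne_zero.mpr h0
                subst hx
                omega
              · rw [if_neg hx, if_neg hx, hgA x]
                simp
            rw [hvals, hrem, pvFact_getD cs.length _ (by positivity) (by simp; omega)]
            rw [pvFoldDiv cs.length _ _ (by
              intro w hw
              obtain ⟨x, hx, rfl⟩ := List.mem_map.mp hw
              refine ⟨by positivity, ?_⟩
              simp only [Int.toNat_natCast]
              have := hcntle x; omega)]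
            simp [Int.toNat_natCast, List.map_map]
            congr 2
          · simp [hlt2]
      -- B's inner loop produces resA + (K.map g).sum
      have hB : freqB.items.foldl
          (fun r p => if 0 < p.2 ∧ p.1 < ch
            then r + PySem.Int.floordiv (PySem.List.pyGetD (pvBuildFact cs.length) (((rest'.length + 1 : Nat) : Int) - 1) 0 * p.2)
                  denom
            else r) resA
          = resA + (K.map g).sum := by
        have hndB : freqB.keys.Nodup := by rw [hkB]; exact hndK
        rw [PySem.Dict.items_eq_map_keys freqB hndB 0, hkB, List.foldl_map]
        rw [pvFoldIf (fun k => 0 < freqB.getD k 0 ∧ k < ch)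
          (fun k => PySem.Int.floordiv (PySem.List.pyGetD (pvBuildFact cs.length) (((rest'.length + 1 : Nat) : Int) - 1) 0 * freqB.getD k 0) denom) K resA]
        congr 1
        apply congrArg List.sum
        apply List.map_congr_left
        intro c hcK
        simp only [hg, hgB c]
        by_cases h0 : List.count c (ch :: rest') = 0
        · simp [h0]
        · by_cases hlt2 : c < ch
          · have hcond : (0:Int) < ((List.count c (ch :: rest') : Nat) : Int) := by
              exact_mod_cast Nat.pos_of_ne_zero h0
            rw [if_pos ⟨hcond, hlt2⟩, if_pos ⟨h0, hlt2⟩]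
            rw [hrem', pvFact_getD cs.length _ (by positivity) (by simp; omega)]
            have hPD := pvProdDec K hndK (fun x => (ch :: rest').count x) c hcK (Nat.one_le_iff_ne_zero.mpr h0)
            rw [hden, ← hPD]
            have hc1 : ((Nat.factorial ((rest'.length : Int)).toNat : Nat) : Int) * ((List.count c (ch :: rest') : Nat) : Int)
                = ((Nat.factorial rest'.length * List.count c (ch :: rest') : Nat) : Int) := by
              push_cast; simp
            rw [hc1, PySem.Int.floordiv_natCast, Nat.mul_div_mul_right _ _ (Nat.pos_of_ne_zero h0)]
          · simp [hlt2]
      have hsum : ((PySem.List.sorted (PySem.Set.ofList cs) id).map g).sum = (K.map g).sum :=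
        (hperm.map g).sum_eq
      -- evaluate the two step functions
      have hstepA : pvStepA cs (pvBuildFact cs.length) (PySem.List.sorted (PySem.Set.ofList cs) id)
          (freqA, resA) (done.length : Int)
          = (freqA.modify ch 0 (fun v => v - 1), resA + (K.map g).sum) := by
        simp only [pvStepA, hch, hA, hsum]
      have hstepB : pvStepB (pvBuildFact cs.length) (freqB, denom, resA, ((ch :: rest').length : Nat))
          ch
          = (freqB.insert ch (freqB.getD ch 0 - 1),
             PySem.Int.floordiv denom (freqB.getD ch 0),
             resA + (K.map g).sum, (rest'.length : Int)) := by
        simp only [pvStepB, List.length_cons]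
        rw [hB, hrem']
      rw [hstepA, hstepB]
      -- invariants for the tail
      have hv1 : 1 ≤ (ch :: rest').count ch := by simp
      have hcnt' : ∀ c, (rest'.count c : Int) = ((ch :: rest').count c : Int) - (if c = ch then 1 else 0) := by
        intro c
        by_cases h : c = ch
        · subst h; simp
        · simp [h, Ne.symm h]
      have hgA' : ∀ c, (freqA.modify ch 0 (fun v => v - 1)).getD c 0 = (rest'.count c : Int) := by
        intro c
        rw [PySem.Dict.getD_modify, hcnt' c]
        by_cases h : c = ch <;> simp [h, hgA]
      have hcontA : freqA.contains ch = true := by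
        rw [PySem.Dict.contains_iff_mem_keys, hkA]
        exact hchK
      have hcontB : freqB.contains ch = true := by
        rw [PySem.Dict.contains_iff_mem_keys, hkB]
        exact hchK
      have hkA' : (freqA.modify ch 0 (fun v => v - 1)).keys = PySem.Set.ofList cs := by
        rw [PySem.Dict.keys_modify, PySem.Dict.keys_insert_of_contains _ _ hcontA, hkA]
      have hkB' : (freqB.insert ch (freqB.getD ch 0 - 1)).keys = PySem.Set.ofList cs := by
        rw [PySem.Dict.keys_insert_of_contains _ _ hcontB, hkB]
      have hgB' : ∀ c, (freqB.insert ch (freqB.getD ch 0 - 1)).getD c 0 = (rest'.count c : Int) := by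
        intro c
        rw [PySem.Dict.getD_insert, hcnt' c]
        by_cases h : c = ch <;> simp [h, hgB]
      have hden' : PySem.Int.floordiv denom (freqB.getD ch 0)
          = ((K.map (fun c => Nat.factorial (rest'.count c))).prod : Int) := by
        have hcntN : ∀ c, rest'.count c = (ch :: rest').count c - (if c = ch then 1 else 0) := by
          intro c; by_cases h : c = ch
          · subst h; simp
          · simp [h, Ne.symm h]
        have hPD := pvProdDec K hndK (fun x => (ch :: rest').count x) ch hchK hv1
        rw [hden, hgB ch, ← hPD, PySem.Int.floordiv_natCast,
          Nat.mul_div_cancel _ (by omega : 0 < (ch :: rest').count ch)]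
        congr 1
        apply congrArg List.prod
        apply List.map_congr_left
        intro x _
        simp only []
        rw [hcntN x]
      have hdl : (done.length : Int) + 1 = ((done ++ [ch]).length : Nat) := by simp
      rw [hdl]
      rw [hden']
      exact ih (done ++ [ch]) _ _ _ _ (by simp [hcs]) hkA' hkB' hgA' hgB' rfl


lemma pvFreqA_eq (cs : List Char) : pvFreqA cs = PySem.Dict.counter cs := by
  rw [pvFreqA, ← PySem.Dict.foldl_insert_getD_add_one_eq_counter]
  congr 1
  funext d c
  by_cases h : d.contains c = true
  · simp [h]
  · have h1 : (d.insert c 0).getD c 0 = 0 := by rw [PySem.Dict.getD_insert]; simp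
    have h2 : d.getD c 0 = 0 :=
      PySem.Dict.getD_of_not_contains d 0 (by simpa using h)
    simp only [h, if_false, Bool.false_eq_true]
    rw [h1, PySem.Dict.insert_insert_self, h2]

lemma pvDenomInit (cs : List Char) :
    (PySem.Dict.counter cs).values.foldl
      (fun a v => a * PySem.List.pyGetD (pvBuildFact cs.length) v 0) 1
    = ((((PySem.Set.ofList cs : List Char)).map (fun c => Nat.factorial (cs.count c))).prod : Int) := by
  rw [PySem.Dict.values_eq_map_keys _ (PySem.Dict.nodup_keys_counter cs) 0,
    PySem.Dict.keys_counter]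
  have h1 : (1 : Int) = ((1 : Nat) : Int) := rfl
  rw [h1, pvFoldMul cs.length _ 1 (by
    intro w hw
    obtain ⟨x, hx, rfl⟩ := List.mem_map.mp hw
    rw [PySem.Dict.getD_counter]
    exact ⟨by positivity, by simpa using List.count_le_length⟩)]
  simp only [List.map_map, PySem.Dict.getD_counter, one_mul]
  congr 2

theorem pvPorts_eq (s : String) :
    find_string_no_permutation_no s = find_string_no_permutation_no_alt s := by
  rw [find_string_no_permutation_no, find_string_no_permutation_no_alt]
  simp only [pvFreqA_eq, PySem.Dict.foldl_insert_getD_add_one_eq_counter, pvDenomInit]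
  have h0 : (0 : Int) = (([] : List Char).length : Int) := by simp
  have hlen : PySem.List.len s.toList = (s.toList.length : Int) := by
    simp [PySem.List.len]
  rw [hlen, h0]
  exact pvMain s.toList s.toList [] _ _ _ 0 rfl
    (PySem.Dict.keys_counter s.toList) (PySem.Dict.keys_counter s.toList)
    (PySem.Dict.getD_counter s.toList) (PySem.Dict.getD_counter s.toList) rfl


-- ===== VERDICT (by name: the statement is the Claim_ definition above) =====
theorem find_string_no_permutation_no_spec : Claim_equal_find_string_no_permutation_no := by
  intro s _
  exact pvPorts_eq s
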